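-- pv_equiv track=rewrite | github.com/SeekingOne/Geekbrains-python-basics | Homeworks/Lesson4/Task6.py | list_gen
-- ===== SOURCE A (Python) =====
-- from itertools import cycle
--
-- def list_gen(base_list: list):
--     """
--     Функция, использующая итератор cycle() для повторения списка 3 раза
--
--     :param base_list: базовый список
--     :return: троекратно повторенная последовательность элементов полученного списка
--     """
--     counter = 0
--     list_len = len(base_list)
--     for val in cycle(base_list):
--         yield val
--         counter += 1
--         if counter // list_len == 3:
--             break
-- ===== SOURCE B (Python) =====
-- def list_gen(base_list: list):
--     """Emit base_list repeated three times: build the tripled sequence in one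
--     shot with list repetition (no loop, no cycle, no counter) and yield it."""
--     yield from base_list * 3
-- ===== Notes on version B (the rewrite author's own statement) =====
-- stated objective: idiomatic
-- what changed: Replaced the cycle() iterator with a running counter and floor-division break by a loop-free construction: Python sequence repetition base_list * 3 materialises the tripled list in one operation and a single yield from emits it.
import Mathlib
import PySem

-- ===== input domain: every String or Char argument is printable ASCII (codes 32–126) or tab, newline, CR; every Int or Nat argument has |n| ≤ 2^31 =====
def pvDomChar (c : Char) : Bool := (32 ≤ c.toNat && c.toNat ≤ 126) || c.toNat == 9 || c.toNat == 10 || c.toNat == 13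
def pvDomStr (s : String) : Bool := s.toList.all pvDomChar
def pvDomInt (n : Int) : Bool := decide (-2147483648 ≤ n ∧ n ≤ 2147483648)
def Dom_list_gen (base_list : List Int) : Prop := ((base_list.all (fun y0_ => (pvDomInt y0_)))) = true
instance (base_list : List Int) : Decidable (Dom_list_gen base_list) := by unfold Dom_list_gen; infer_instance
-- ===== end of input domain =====

-- B replaces A's cycle()+counter+break generator by the loop-free `yield from base_list * 3` (idiomatic, no loop state).


-- ===== PORT A =====
-- Port of A. `cycle(base_list)` is ported by hand (exact): the loop yields
-- base_list[counter % len] for counter = 0,1,2,…, and breaks the first time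
-- counter // len = 3, i.e. after exactly 3*len yields (for an empty list the
-- cycle iterator is empty and the loop body never runs).
def list_gen (base_list : List Int) : List Int :=
  let list_len := base_list.length
  (List.range (3 * list_len)).map (fun i => base_list.getD (i % list_len) 0)

-- ===== PORT B =====
-- Port of B: `base_list * 3` (Python sequence repetition = concatenation of 3 copies), emitted as is.
def list_gen_alt (base_list : List Int) : List Int :=
  (List.replicate 3 base_list).flatten

-- ===== PRECONDITION & SPEC =====
def Spec_list_gen (base_list : List Int) (out : List Int) : Prop := out = list_gen_alt base_list
instance (base_list : List Int) (out : List Int) : Decidable (Spec_list_gen base_list out) := by unfold Spec_list_gen; infer_instance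

-- ===== CLAIM (what is proved, stated in full; the proofs are below) =====
def Claim_equal_list_gen : Prop := ∀ (base_list : List Int), Dom_list_gen base_list → Spec_list_gen base_list (list_gen base_list)

-- ===== LEMMAS AND PROOFS =====

lemma map_getD_range (l : List Int) :
    (List.range l.length).map (fun i => l.getD i 0) = l := by
  apply List.ext_getElem
  · simp
  · intro i h1 h2
    simp [List.getD, List.getElem?_eq_getElem h2]

lemma cycle_eq_replicate (l : List Int) (k : Nat) :
    (List.range (k * l.length)).map (fun i => l.getD (i % l.length) 0)
    = (List.replicate k l).flatten := by
  induction k with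
  | zero => simp
  | succ k ih =>
    have hn : (k + 1) * l.length = k * l.length + l.length := by ring
    rw [hn, List.range_add, List.map_append, ih, List.replicate_succ', List.flatten_append]
    simp only [List.flatten_cons, List.flatten_nil, List.append_nil]
    congr 1
    rw [List.map_map]
    calc (List.range l.length).map ((fun i => l.getD (i % l.length) 0) ∘ (k * l.length + ·))
        = (List.range l.length).map (fun i => l.getD i 0) := by
          apply List.map_congr_left
          intro i hi
          simp only [Function.comp]
          have : i < l.length := List.mem_range.mp hi
          rw [Nat.add_comm, Nat.add_mul_mod_self_right, Nat.mod_eq_of_lt this]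
      _ = l := map_getD_range l

-- ===== VERDICT (by name: the statement is the Claim_ definition above) =====
theorem list_gen_spec : Claim_equal_list_gen := by
  intro base_list _
  unfold Spec_list_gen list_gen list_gen_alt
  exact cycle_eq_replicate base_list 3
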